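-- pv_equiv track=rewrite | github.com/bensmus/box-grouping-optimization | final/hillclimb.py | compute_grouping_cost
-- ===== SOURCE A (Python) =====
-- def compute_grouping_cost(cells, grouping):
--     def compute_group_cost(cells, group):
--         # `cells` and `group` are both collections of tuples.
--         cell_rows = [row for (row, _) in cells]
--         cells_height = max(cell_rows) - min(cell_rows) + 1
--         group_cost = 0
--         # Iterate through a bounding box of cells,
--         # simulating the access of group (from top to bottom).
--         group_columns = {column for (_, column) in group} # Set ensures that same column not scanned twice.
--         for column in group_columns:
--             column_subcosts = []
--             cell_above_flag = False
--             cells_above = 0 # Important for non-rectangular cell stacks.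
--             for row in range(cells_height):
--                 iter_cell = (row, column)
--                 if iter_cell in group:
--                     if not cell_above_flag: # Consider whether cell above was in group.
--                         column_subcosts.append(cells_above)
--                     cell_above_flag = True
--                 else:
--                     cell_above_flag = False
--                 if iter_cell in cells:
--                     cells_above += 1
--             column_cost = sum(column_subcosts)
--             group_cost += column_cost
--         return group_cost
--     """
--     E.g. 3x2 stack:
--     cells = [(0, 0), (0, 1), (1, 0), (1, 1), (2, 0), (2, 1)]
--     grouping = { {(0, 0), (0, 1)}, {(1, 0), (1, 1)}, {(2, 0), (2, 1)} }
--     grouping_cost would be 2 because avg of first group cost is 0, second is 2, third is 4.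
--     """
--     group_costs = [compute_group_cost(cells, group) for group in grouping]
--     grouping_cost = sum(group_costs)
--     return grouping_cost
-- ===== SOURCE B (Python) =====
-- from bisect import bisect_left
--
-- def compute_grouping_cost(cells, grouping):
--     # Precompute, per column, the sorted list of distinct cell rows inside the
--     # row window [0, cells_height); each group cost is then the sum, over the
--     # run-start cells of the group, of a bisect count of cell rows above it.
--     cell_rows = [row for (row, _) in cells]
--     cells_height = max(cell_rows) - min(cell_rows) + 1
--     window = [(column, row) for (row, column) in set(cells) if 0 <= row < cells_height]
--     col_rows = {}
--     for (column, row) in window: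
--         col_rows.setdefault(column, []).append(row)
--     col_rows = {column: sorted(rows) for (column, rows) in col_rows.items()}
--     total = 0
--     for group in grouping:
--         gset = set(group)
--         for (row, column) in gset:
--             if 0 <= row < cells_height and (row == 0 or (row - 1, column) not in gset):
--                 total += bisect_left(col_rows.get(column, []), row)
--     return total
-- ===== Notes on version B (the rewrite author's own statement) =====
-- stated objective: faster
-- what changed: A scans every bounding-box row of every distinct group column with linear list membership tests; B precomputes one dict mapping each column to the sorted list of its distinct in-window cell rows and, iterating only the distinct group cells, adds a bisect count at each run-start cell, so no per-row scan remains.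
-- outside the precondition, e.g. on compute_grouping_cost([], []): A returns 0, B raises ValueError; on compute_grouping_cost([], [{(0, 0)}]): A raises ValueError, B raises ValueError
import Mathlib
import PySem

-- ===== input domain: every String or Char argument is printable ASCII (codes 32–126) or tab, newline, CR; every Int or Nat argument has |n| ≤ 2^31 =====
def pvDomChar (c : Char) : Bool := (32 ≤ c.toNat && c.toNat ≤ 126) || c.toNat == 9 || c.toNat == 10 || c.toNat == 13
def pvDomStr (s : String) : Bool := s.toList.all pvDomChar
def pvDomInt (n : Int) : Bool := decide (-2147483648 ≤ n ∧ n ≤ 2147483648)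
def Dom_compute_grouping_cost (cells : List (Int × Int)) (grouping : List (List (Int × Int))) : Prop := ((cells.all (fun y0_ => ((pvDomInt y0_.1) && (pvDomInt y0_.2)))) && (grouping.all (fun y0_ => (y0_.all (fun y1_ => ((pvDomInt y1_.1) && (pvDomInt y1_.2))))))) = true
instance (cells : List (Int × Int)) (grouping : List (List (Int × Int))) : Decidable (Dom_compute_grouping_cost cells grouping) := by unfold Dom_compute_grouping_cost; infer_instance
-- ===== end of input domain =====

-- B replaces A's per-column scan over every bounding-box row with a per-column dict of sorted
-- cell rows queried by bisect at each run-start group cell (alternative decomposition, faster in practice).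

-- ===== PORT A =====
-- one iteration of A's inner 'for row in range(cells_height)' loop;
-- state = (column_subcosts, cell_above_flag, cells_above)
def pvAstep (cells group : List (Int × Int)) (column : Int)
    (st : List Int × Bool × Int) (row : Int) : List Int × Bool × Int :=
  let iter_cell : Int × Int := (row, column)
  let s1 : List Int × Bool :=
    if group.contains iter_cell then
      ((if st.2.1 = false then st.1 ++ [st.2.2] else st.1), true)
    else (st.1, false)
  let cells_above : Int := if cells.contains iter_cell then st.2.2 + 1 else st.2.2
  (s1.1, s1.2, cells_above)

-- A's nested compute_group_cost
def pvA_groupCost (cells group : List (Int × Int)) : Int :=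
  let cell_rows := cells.map (fun p => p.1)
  -- max(cell_rows) - min(cell_rows) + 1 ; empty cells (ValueError) excluded by Pre_
  let cells_height : Int :=
    ((PySem.List.max? cell_rows (fun x => x)).getD 0) - ((PySem.List.min? cell_rows (fun x => x)).getD 0) + 1
  let group_columns : PySem.Set Int := PySem.Set.ofList (group.map (fun p => p.2))
  -- the set is consumed by a sum of per-column costs, which is iteration-order independent
  group_columns.foldl (fun group_cost column =>
    let st := (PySem.List.pyRange 0 cells_height).foldl (pvAstep cells group column) ([], false, 0)
    group_cost + st.1.sum) 0

def compute_grouping_cost (cells : List (Int × Int)) (grouping : List (List (Int × Int))) : Int :=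
  (grouping.map (fun group => pvA_groupCost cells group)).sum

-- ===== PORT B =====
def compute_grouping_cost_alt (cells : List (Int × Int)) (grouping : List (List (Int × Int))) : Int :=
  let cell_rows := cells.map (fun p => p.1)
  let cells_height : Int :=
    ((PySem.List.max? cell_rows (fun x => x)).getD 0) - ((PySem.List.min? cell_rows (fun x => x)).getD 0) + 1
  -- window = [(column, row) for (row, column) in set(cells) if 0 <= row < cells_height]
  let window : List (Int × Int) :=
    ((PySem.Set.ofList cells).filter (fun p => decide (0 ≤ p.1) && decide (p.1 < cells_height))).map
      (fun p => (p.2, p.1))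
  -- col_rows.setdefault(column, []).append(row)
  let raw : PySem.Dict Int (List Int) :=
    window.foldl (fun d p => d.modify p.1 [] (fun rs => rs ++ [p.2])) PySem.Dict.empty
  -- {column: sorted(rows) for (column, rows) in col_rows.items()}
  let col_rows : PySem.Dict Int (List Int) :=
    PySem.Dict.mk (raw.items.map (fun p => (p.1, PySem.List.sorted p.2 (fun x => x))))
  grouping.foldl (fun total group =>
    let gset : PySem.Set (Int × Int) := PySem.Set.ofList group
    -- set consumed by an order-independent sum
    gset.foldl (fun total p =>
      if (decide (0 ≤ p.1) && decide (p.1 < cells_height) &&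
          (p.1 == 0 || !(gset.contains (p.1 - 1, p.2)))) then
        total + (PySem.List.bisectLeft (col_rows.getD p.2 []) p.1 : Int)
      else total) total) 0

-- ===== PRECONDITION & SPEC =====
-- Pre_ excludes empty `cells`: there Python A raises ValueError (max of an empty sequence) whenever
-- grouping is nonempty, and on ([], []) A returns 0 while B itself raises the same ValueError
-- because it hoists the max/min computation out of the per-group loop.
def Pre_compute_grouping_cost (cells : List (Int × Int)) (grouping : List (List (Int × Int))) : Prop :=
  cells ≠ []
instance (cells : List (Int × Int)) (grouping : List (List (Int × Int))) : Decidable (Pre_compute_grouping_cost cells grouping) := by unfold Pre_compute_grouping_cost; infer_instance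

def pvWitness_compute_grouping_cost : (List (Int × Int)) × (List (List (Int × Int))) :=
  ([(0, 0), (1, 0), (2, 0)], [[(0, 0), (1, 0)], [(2, 0)]])

def Spec_compute_grouping_cost (cells : List (Int × Int)) (grouping : List (List (Int × Int))) (out : Int) : Prop := out = compute_grouping_cost_alt cells grouping
instance (cells : List (Int × Int)) (grouping : List (List (Int × Int))) (out : Int) : Decidable (Spec_compute_grouping_cost cells grouping out) := by unfold Spec_compute_grouping_cost; infer_instance

-- ===== CLAIM (what is proved, stated in full; the proofs are below) =====
def Claim_equal_compute_grouping_cost : Prop := ∀ (cells : List (Int × Int)) (grouping : List (List (Int × Int))), Dom_compute_grouping_cost cells grouping → Pre_compute_grouping_cost cells grouping → Spec_compute_grouping_cost cells grouping (compute_grouping_cost cells grouping)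

-- ===== LEMMAS AND PROOFS =====

-- the shared cells_height expression
def pvH (cells : List (Int × Int)) : Int :=
  ((PySem.List.max? (cells.map (fun p => p.1)) (fun x => x)).getD 0)
    - ((PySem.List.min? (cells.map (fun p => p.1)) (fun x => x)).getD 0) + 1

-- number of rows 0 ≤ k < r with (k, c) ∈ cells  (A's cells_above at row r)
def pvCnt (cells : List (Int × Int)) (c r : Int) : Int :=
  (((List.range r.toNat).filter (fun (k : Nat) => cells.contains ((k : Int), c))).length : Int)

-- run-start test at (r, c) for a group
def pvStart (g : List (Int × Int)) (r c : Int) : Bool :=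
  g.contains (r, c) && (r == 0 || !g.contains (r - 1, c))

-- B's guard at a distinct group cell, phrased on the group list
def pvCond (cells g : List (Int × Int)) (p : Int × Int) : Bool :=
  decide (0 ≤ p.1) && decide (p.1 < pvH cells) && (p.1 == 0 || !g.contains (p.1 - 1, p.2))

-- B's per-column dict of sorted in-window cell rows
def pvColRows (cells : List (Int × Int)) : PySem.Dict Int (List Int) :=
  let window : List (Int × Int) :=
    ((PySem.Set.ofList cells).filter (fun p => decide (0 ≤ p.1) && decide (p.1 < pvH cells))).map
      (fun p => (p.2, p.1))
  let raw : PySem.Dict Int (List Int) :=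
    window.foldl (fun d p => d.modify p.1 [] (fun rs => rs ++ [p.2])) PySem.Dict.empty
  PySem.Dict.mk (raw.items.map (fun p => (p.1, PySem.List.sorted p.2 (fun x => x))))

lemma pvH_pos (cells : List (Int × Int)) : 0 < pvH cells := by
  unfold pvH
  cases cells with
  | nil => simp [PySem.List.max?, PySem.List.min?]
  | cons x t =>
    obtain ⟨m, hm⟩ : ∃ m, PySem.List.max? ((x :: t).map (fun p => p.1)) (fun x => x) = some m := by
      cases h : PySem.List.max? ((x :: t).map (fun p => p.1)) (fun x => x) with
      | none => exact absurd ((PySem.List.max?_eq_none_iff _ _).mp h) (by simp)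
      | some m => exact ⟨m, rfl⟩
    obtain ⟨m', hm'⟩ : ∃ m', PySem.List.min? ((x :: t).map (fun p => p.1)) (fun x => x) = some m' := by
      cases h : PySem.List.min? ((x :: t).map (fun p => p.1)) (fun x => x) with
      | none => exact absurd ((PySem.List.min?_eq_none_iff _ _).mp h) (by simp)
      | some m' => exact ⟨m', rfl⟩
    have h1 := PySem.List.max?_isMax hm
    have h2 := PySem.List.min?_mem hm'
    have := h1 _ h2
    simp only [hm, hm', Option.getD_some]
    omega

lemma pvCnt_succ (cells : List (Int × Int)) (c : Int) (n : Nat) :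
    pvCnt cells c ((n + 1 : Nat) : Int)
      = pvCnt cells c (n : Int) + (if cells.contains ((n : Int), c) then 1 else 0) := by
  unfold pvCnt
  have h1 : (((n + 1 : Nat) : Int)).toNat = n + 1 := by omega
  rw [h1, List.range_succ, List.filter_append]
  simp only [Int.toNat_natCast]
  by_cases h : ((n : Int), c) ∈ cells <;> simp [h]

-- A's inner row loop, characterised
lemma pvA_loop (cells g : List (Int × Int)) (c : Int) (n : Nat) :
    ((List.range n).map (fun (k : Nat) => (k : Int))).foldl (pvAstep cells g c) ([], false, 0)
      = (((List.range n).filter (fun (k : Nat) => pvStart g (k : Int) c)).map (fun (k : Nat) => pvCnt cells c (k : Int)),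
         (decide (0 < n) && g.contains (((n : Int) - 1), c)),
         pvCnt cells c (n : Int)) := by
  induction n with
  | zero => simp [pvCnt]
  | succ n ih =>
    rw [List.range_succ, List.map_append, List.foldl_append, ih, List.filter_append,
        List.map_append]
    have hsub : ((n + 1 : Nat) : Int) - 1 = (n : Int) := by push_cast; ring
    have hn1 : (decide (0 < n + 1) : Bool) = true := by simp
    rw [hsub, hn1, pvCnt_succ]
    by_cases hg : g.contains ((n : Int), c)
    · by_cases hf : (decide (0 < n) && g.contains ((n : Int) - 1, c)) = true
      · have hst : pvStart g (n : Int) c = false := by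
          simp only [Bool.and_eq_true, decide_eq_true_eq] at hf
          have h0 : 0 < n := hf.1
          have hm : ((n : Int) - 1, c) ∈ g := List.mem_of_elem_eq_true hf.2
          simp [pvStart, hm]
          omega
        simp only [List.map_cons, List.map_nil, List.foldl_cons, List.foldl_nil,
          List.filter_cons, List.filter_nil, hst, pvAstep, hg, hf]
        by_cases hc : ((n : Int), c) ∈ cells <;> simp [hc]
      · have hst : pvStart g (n : Int) c = true := by
          have hf2 : ¬(0 < n ∧ ((n : Int) - 1, c) ∈ g) := by simpa using hf
          simp only [pvStart, hg, Bool.true_and]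
          rcases Nat.eq_zero_or_pos n with h0 | h0
          · subst h0; simp
          · simp only [Bool.or_eq_true, beq_iff_eq, Bool.not_eq_true']
            right
            have : ((n : Int) - 1, c) ∉ g := fun hm => hf2 ⟨h0, hm⟩
            simpa using this
        have hf' : (decide (0 < n) && g.contains ((n : Int) - 1, c)) = false := by
          revert hf; cases (decide (0 < n) && g.contains ((n : Int) - 1, c)) <;> simp
        simp only [List.map_cons, List.map_nil, List.foldl_cons, List.foldl_nil,
          List.filter_cons, List.filter_nil, hst, pvAstep, hg, hf']
        by_cases hc : ((n : Int), c) ∈ cells <;> simp [hc]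
    · have hst : pvStart g (n : Int) c = false := by
        have hmg : ((n : Int), c) ∉ g := by simpa using hg
        simp [pvStart, hmg]
      simp only [List.map_cons, List.map_nil, List.foldl_cons, List.foldl_nil,
        List.filter_cons, List.filter_nil, hst, pvAstep, hg]
      by_cases hc : ((n : Int), c) ∈ cells <;> simp [hc]

lemma pvBisect_eq_countP (xs : List Int) (x : Int)
    (h : List.Pairwise (fun a b => a ≤ b) xs) :
    PySem.List.bisectLeft xs x = xs.countP (fun y => decide (y < x)) := by
  obtain ⟨hle, hlt, hge⟩ := PySem.List.bisectLeft_spec xs x h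
  set i := PySem.List.bisectLeft xs x with hi
  rw [← List.take_append_drop i xs, List.countP_append]
  have h1 : (xs.take i).countP (fun y => decide (y < x)) = (xs.take i).length := by
    apply List.countP_eq_length.mpr
    intro a ha
    obtain ⟨j, hj, hja⟩ := List.mem_iff_getElem.mp ha
    have hj2 : j < min i xs.length := by simpa [List.length_take] using hj
    have hjlt : j < i := by omega
    have hj' : j < xs.length := by omega
    rw [List.getElem_take] at hja
    subst hja
    simpa using hlt j hj' hjlt
  have h2 : (xs.drop i).countP (fun y => decide (y < x)) = 0 := by
    apply List.countP_eq_zero.mpr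
    intro a ha
    obtain ⟨j, hj, hja⟩ := List.mem_iff_getElem.mp ha
    have hjd : j < xs.length - i := by simpa [List.length_drop] using hj
    have hj' : i + j < xs.length := by omega
    rw [List.getElem_drop] at hja
    subst hja
    have := hge (i + j) hj' (by omega)
    simp
    omega
  rw [h1, h2, List.length_take]
  omega

-- dict comprehension {k: sorted(v) for (k, v) in d.items()} looked up
lemma pvGet?_mk_map_sorted (l : List (Int × List Int)) (c : Int) :
    (PySem.Dict.mk (l.map (fun p => (p.1, PySem.List.sorted p.2 (fun x => x))))).get? c
      = ((PySem.Dict.mk l).get? c).map (fun v => PySem.List.sorted v (fun x => x)) := by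
  induction l with
  | nil => simp [PySem.Dict.get?]
  | cons p t ih =>
    rw [List.map_cons, PySem.Dict.get?_mk_cons, PySem.Dict.get?_mk_cons]
    by_cases hp : (p.1 == c) <;> simp [hp, ih]

-- splitting a sum over a list by a disjoint predicate
lemma pvSum_filter_split {α : Type} (l : List α) (p q : α → Bool) (f : α → Int)
    (hdis : ∀ x ∈ l, ¬(p x = true ∧ q x = true)) :
    ((l.filter (fun x => p x || q x)).map f).sum
      = ((l.filter p).map f).sum + ((l.filter q).map f).sum := by
  induction l with
  | nil => simp
  | cons a t ih =>
    have ih' := ih (fun x hx => hdis x (List.mem_cons_of_mem _ hx))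
    have hda := hdis a (List.mem_cons_self ..)
    by_cases hp : p a
    · have hq : q a = false := by
        cases hqa : q a
        · rfl
        · exact absurd ⟨hp, hqa⟩ hda
      simp [List.filter_cons, hp, hq, ih']
      ring
    · by_cases hq : q a <;> simp [List.filter_cons, hp, hq, ih'] <;> ring

-- summing fiberwise over the distinct columns
lemma pvSum_fibers (C : List Int) (l : List (Int × Int)) (w : Int × Int → Int)
    (hC : C.Nodup) (hcov : ∀ p ∈ l, p.2 ∈ C) :
    (C.map (fun c => ((l.filter (fun p => p.2 == c)).map w).sum)).sum = (l.map w).sum := by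
  induction C generalizing l with
  | nil =>
    have : l = [] := List.eq_nil_iff_forall_not_mem.mpr (fun p hp => by simpa using hcov p hp)
    simp [this]
  | cons c C' ih =>
    have hC' : C'.Nodup := hC.of_cons
    have hcnot : c ∉ C' := by
      have := List.nodup_cons.mp hC
      exact this.1
    set l₂ := l.filter (fun p => !(p.2 == c)) with hl₂
    have hsplit : (l.map w).sum
        = ((l.filter (fun p => p.2 == c)).map w).sum + (l₂.map w).sum := by
      have htot : l.filter (fun p => (p.2 == c) || !(p.2 == c)) = l :=
        List.filter_eq_self.mpr (fun p _ => by cases h : (p.2 == c) <;> simp [h])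
      rw [← pvSum_filter_split l _ _ w (fun x _ h => by
            rcases h with ⟨h1, h2⟩; rw [h1] at h2; simp at h2), htot]
    have hfib : ∀ c' ∈ C', l.filter (fun p => p.2 == c') = l₂.filter (fun p => p.2 == c') := by
      intro c' hc'
      rw [hl₂, List.filter_filter]
      apply List.filter_congr
      intro p _
      cases h : (p.2 == c')
      · simp
      · have hpc : p.2 = c' := by simpa using h
        have hne : ¬(p.2 == c) = true := by simp [hpc]; rintro rfl; exact hcnot hc'
        simp [h, hne]
    have hcov₂ : ∀ p ∈ l₂, p.2 ∈ C' := by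
      intro p hp
      have hpl : p ∈ l := List.mem_of_mem_filter hp
      have hne : ¬(p.2 == c) = true := by
        have := List.of_mem_filter hp; simpa using this
      have := hcov p hpl
      rw [List.mem_cons] at this
      rcases this with h | h
      · exact absurd (by simp [h]) hne
      · exact h
    rw [List.map_cons, List.sum_cons]
    have hmap : (C'.map (fun c'' => ((l.filter (fun p => p.2 == c'')).map w).sum))
        = (C'.map (fun c'' => ((l₂.filter (fun p => p.2 == c'')).map w).sum)) :=
      List.map_congr_left (fun c' hc' => by rw [hfib c' hc'])
    rw [hmap, ih l₂ hC' hcov₂, hsplit]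

-- rows-below count transferred from the range scan to the distinct-cell list
lemma pvCount_transfer (cells : List (Int × Int)) (c r H : Int) (h0 : 0 ≤ r) (hrH : r ≤ H) :
    ((PySem.Set.ofList cells).countP
        (fun p => ((decide (0 ≤ p.1) && decide (p.1 < H)) && (p.2 == c)) && decide (p.1 < r)) : Int)
      = pvCnt cells c r := by
  unfold pvCnt
  rw [List.countP_eq_length_filter]
  have hperm : ((PySem.Set.ofList cells).filter
        (fun p => ((decide (0 ≤ p.1) && decide (p.1 < H)) && (p.2 == c)) && decide (p.1 < r))).Perm
      (((List.range r.toNat).filter (fun (k : Nat) => cells.contains ((k : Int), c))).map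
        (fun (k : Nat) => ((k : Int), c))) := by
    apply (List.perm_ext_iff_of_nodup ?_ ?_).mpr
    · intro q
      constructor
      · intro hq
        have hmem : q ∈ PySem.Set.ofList cells := List.mem_of_mem_filter hq
        have hqc : q ∈ cells := (PySem.Set.mem_ofList cells q).mp hmem
        have hcond := List.of_mem_filter hq
        simp only [Bool.and_eq_true, decide_eq_true_eq, beq_iff_eq] at hcond
        obtain ⟨⟨⟨hq0, hqH⟩, hq2⟩, hqr⟩ := hcond
        refine List.mem_map.mpr ⟨q.1.toNat, ?_, ?_⟩
        · refine List.mem_filter.mpr ⟨List.mem_range.mpr (by omega), ?_⟩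
          have : ((q.1.toNat : Int), c) = q := by
            obtain ⟨q1, q2⟩ := q; simp at hq2 hq0 ⊢; constructor
            · omega
            · omega
          rw [this]
          exact List.elem_eq_true_of_mem hqc
        · obtain ⟨q1, q2⟩ := q; simp at hq0 hq2 ⊢; constructor <;> omega
      · intro hq
        obtain ⟨k, hk, hkq⟩ := List.mem_map.mp hq
        have hk2 := List.mem_filter.mp hk
        have hkr : k < r.toNat := List.mem_range.mp hk2.1
        have hkc : ((k : Int), c) ∈ cells := List.mem_of_elem_eq_true hk2.2
        subst hkq
        refine List.mem_filter.mpr ⟨(PySem.Set.mem_ofList cells _).mpr hkc, ?_⟩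
        simp only [Bool.and_eq_true, decide_eq_true_eq, beq_iff_eq]
        refine ⟨⟨⟨by positivity, by omega⟩, by simp⟩, by omega⟩
    · exact (PySem.Set.nodup_ofList cells).filter _
    · refine List.Nodup.map ?_ (List.nodup_range.filter _)
      intro a b hab
      have := congrArg Prod.fst hab
      simpa using this
  rw [hperm.length_eq, List.length_map]

-- each column's scanned run-starts are exactly the distinct group cells of that column
lemma pvFiber_perm (cells g : List (Int × Int)) (c : Int) :
    (((List.range (pvH cells).toNat).filter (fun (k : Nat) => pvStart g (k : Int) c)).map
        (fun (k : Nat) => ((k : Int), c))).Perm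
      (((PySem.Set.ofList g).filter (pvCond cells g)).filter (fun p => p.2 == c)) := by
  apply (List.perm_ext_iff_of_nodup ?_ ?_).mpr
  · intro q
    constructor
    · intro hq
      obtain ⟨k, hk, hkq⟩ := List.mem_map.mp hq
      have hk2 := List.mem_filter.mp hk
      have hkH : k < (pvH cells).toNat := List.mem_range.mp hk2.1
      have hst := hk2.2
      unfold pvStart at hst
      simp only [Bool.and_eq_true] at hst
      have hmem : ((k : Int), c) ∈ g := List.mem_of_elem_eq_true hst.1
      subst hkq
      refine List.mem_filter.mpr ⟨List.mem_filter.mpr ⟨(PySem.Set.mem_ofList g _).mpr hmem, ?_⟩, by simp⟩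
      unfold pvCond
      simp only [Bool.and_eq_true, decide_eq_true_eq]
      exact ⟨⟨by positivity, by omega⟩, hst.2⟩
    · intro hq
      have hq1 := List.mem_filter.mp hq
      have hqc : q.2 = c := by simpa using hq1.2
      have hq2 := List.mem_filter.mp hq1.1
      have hmem : q ∈ g := (PySem.Set.mem_ofList g q).mp hq2.1
      have hcond := hq2.2
      unfold pvCond at hcond
      simp only [Bool.and_eq_true, decide_eq_true_eq] at hcond
      obtain ⟨⟨hq0, hqH⟩, hrun⟩ := hcond
      refine List.mem_map.mpr ⟨q.1.toNat, ?_, ?_⟩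
      · refine List.mem_filter.mpr ⟨List.mem_range.mpr (by omega), ?_⟩
        unfold pvStart
        have hcast1 : ((q.1.toNat : Int)) = q.1 := Int.toNat_of_nonneg hq0
        rw [hcast1]
        simp only [Bool.and_eq_true]
        constructor
        · have hpair : (q.1, c) = q := by rw [← hqc]
          rw [hpair]
          exact List.elem_eq_true_of_mem hmem
        · rw [← hqc]
          exact hrun
      · obtain ⟨q1, q2⟩ := q; simp at hqc hq0 ⊢; constructor <;> omega
  · refine List.Nodup.map ?_ (List.nodup_range.filter _)
    intro a b hab
    have := congrArg Prod.fst hab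
    simpa using this
  · exact ((PySem.Set.nodup_ofList g).filter _).filter _

-- the bisect made by B equals A's cells_above count
lemma pvBis_eq (cells : List (Int × Int)) (c r : Int) (h0 : 0 ≤ r) (hr : r < pvH cells) :
    (PySem.List.bisectLeft ((pvColRows cells).getD c []) r : Int) = pvCnt cells c r := by
  have hsorted_nil : PySem.List.sorted ([] : List Int) (fun x => x) = [] := rfl
  -- step 1: the dict value is the sorted per-column row list
  set raw := (((PySem.Set.ofList cells).filter (fun p => decide (0 ≤ p.1) && decide (p.1 < pvH cells))).map
      (fun p => (p.2, p.1))).foldl (fun d p => d.modify p.1 [] (fun rs => rs ++ [p.2])) PySem.Dict.empty with hrawdef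
  have hraw : raw.getD c []
      = ((((PySem.Set.ofList cells).filter (fun p => decide (0 ≤ p.1) && decide (p.1 < pvH cells))).map
          (fun p => (p.2, p.1))).filter (fun p => p.1 == c)).map (fun p => p.2) := by
    rw [hrawdef, PySem.Dict.getD_foldl_modify_append]
    simp [PySem.Dict.getD_empty]
  have hcol : (pvColRows cells).getD c [] = PySem.List.sorted (raw.getD c []) (fun x => x) := by
    have h1 : pvColRows cells = PySem.Dict.mk (raw.items.map (fun p => (p.1, PySem.List.sorted p.2 (fun x => x)))) := rfl
    rw [h1, PySem.Dict.getD_eq_get?_getD, PySem.Dict.getD_eq_get?_getD]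
    have h2 : (PySem.Dict.mk raw.items) = raw := rfl
    rw [pvGet?_mk_map_sorted, h2]
    cases hg : raw.get? c with
    | none => simp [hsorted_nil]
    | some v => simp
  rw [hcol]
  have hpair := PySem.List.sorted_pairwise (raw.getD c []) (fun x => x)
  rw [pvBisect_eq_countP _ _ hpair,
      (PySem.List.sorted_perm (raw.getD c []) (fun x => x) false).countP_eq]
  have hrawc : raw.getD c []
      = ((((PySem.Set.ofList cells).filter (fun p => decide (0 ≤ p.1) && decide (p.1 < pvH cells))).filter
          (fun p => p.2 == c)).map (fun p => (p.2, p.1))).map (fun p => p.2) := by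
    rw [hraw, List.filter_map]
    rfl
  rw [hrawc, List.map_map, List.countP_map, List.countP_filter, List.countP_filter]
  rw [← pvCount_transfer cells c r (pvH cells) h0 (le_of_lt hr)]
  congr 1
  apply List.countP_congr
  intro p _
  simp only [Function.comp]
  constructor
  · intro h
    simp only [Bool.and_eq_true] at h ⊢
    tauto
  · intro h
    simp only [Bool.and_eq_true] at h ⊢
    tauto

lemma pvContains_ofList (l : List (Int × Int)) (q : Int × Int) :
    (PySem.Set.ofList l).contains q = l.contains q := by
  by_cases h : q ∈ l
  · have h2 : q ∈ PySem.Set.ofList l := (PySem.Set.mem_ofList l q).mpr h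
    simp [h, h2]
  · have h2 : q ∉ PySem.Set.ofList l := fun hh => h ((PySem.Set.mem_ofList l q).mp hh)
    simp [h, h2]

-- A's per-group cost as a sum over the distinct run-start cells of the group
lemma pvA_group_eq (cells g : List (Int × Int)) :
    pvA_groupCost cells g
      = (((PySem.Set.ofList g).filter (pvCond cells g)).map (fun p => pvCnt cells p.2 p.1)).sum := by
  unfold pvA_groupCost
  dsimp only
  rw [PySem.List.foldl_add]
  rw [zero_add]
  have hcol : ∀ c : Int,
      (((PySem.List.pyRange 0
          (((PySem.List.max? (cells.map (fun p => p.1)) (fun x => x)).getD 0)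
            - ((PySem.List.min? (cells.map (fun p => p.1)) (fun x => x)).getD 0) + 1)).foldl
          (pvAstep cells g c) ([], false, 0)).1).sum
        = ((((PySem.Set.ofList g).filter (pvCond cells g)).filter (fun p => p.2 == c)).map
            (fun p => pvCnt cells p.2 p.1)).sum := by
    intro c
    have hHeq : ((PySem.List.max? (cells.map (fun p => p.1)) (fun x => x)).getD 0)
        - ((PySem.List.min? (cells.map (fun p => p.1)) (fun x => x)).getD 0) + 1 = pvH cells := rfl
    rw [hHeq]
    have hH0 : (0 : Int) ≤ pvH cells := (pvH_pos cells).le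
    have hcast : pvH cells = (((pvH cells).toNat : Nat) : Int) := (Int.toNat_of_nonneg hH0).symm
    rw [hcast, PySem.List.pyRange_zero_natCast, pvA_loop]
    have hperm := (pvFiber_perm cells g c).map (fun p => pvCnt cells p.2 p.1)
    have := hperm.sum_eq
    rw [List.map_map] at this
    exact this
  rw [List.map_congr_left (fun c _ => hcol c)]
  apply pvSum_fibers
  · exact PySem.Set.nodup_ofList _
  · intro p hp
    have hpg : p ∈ g := (PySem.Set.mem_ofList g p).mp (List.mem_of_mem_filter hp)
    exact (PySem.Set.mem_ofList _ _).mpr (List.mem_map.mpr ⟨p, hpg, rfl⟩)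

-- B's inner loop over the distinct cells of a group
lemma pvBfold (cells g : List (Int × Int)) (l : List (Int × Int)) (total : Int) :
    l.foldl (fun total p =>
        if (decide (0 ≤ p.1) && decide (p.1 < pvH cells) &&
            (p.1 == 0 || !((PySem.Set.ofList g).contains (p.1 - 1, p.2)))) then
          total + (PySem.List.bisectLeft ((pvColRows cells).getD p.2 []) p.1 : Int)
        else total) total
      = total + ((l.filter (pvCond cells g)).map
          (fun p => (PySem.List.bisectLeft ((pvColRows cells).getD p.2 []) p.1 : Int))).sum := by
  induction l generalizing total with
  | nil => simp
  | cons p t ih =>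
    have hc : (decide (0 ≤ p.1) && decide (p.1 < pvH cells) &&
        (p.1 == 0 || !((PySem.Set.ofList g).contains (p.1 - 1, p.2)))) = pvCond cells g p := by
      unfold pvCond
      rw [pvContains_ofList]
    rw [List.foldl_cons, List.filter_cons, hc]
    by_cases h : pvCond cells g p
    · rw [h]
      simp only [if_true, ih]
      simp [h]
      ring
    · have h' : pvCond cells g p = false := by simp [h]
      rw [h']
      simp only [if_false, ih]
      simp [h']

-- B's per-group total
lemma pvB_group (cells g : List (Int × Int)) (total : Int) :
    (PySem.Set.ofList g).foldl (fun total p =>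
        if (decide (0 ≤ p.1) && decide (p.1 < pvH cells) &&
            (p.1 == 0 || !((PySem.Set.ofList g).contains (p.1 - 1, p.2)))) then
          total + (PySem.List.bisectLeft ((pvColRows cells).getD p.2 []) p.1 : Int)
        else total) total
      = total + (((PySem.Set.ofList g).filter (pvCond cells g)).map
          (fun p => pvCnt cells p.2 p.1)).sum := by
  rw [pvBfold]
  have hmap : ∀ p ∈ (PySem.Set.ofList g).filter (pvCond cells g),
      (PySem.List.bisectLeft ((pvColRows cells).getD p.2 []) p.1 : Int) = pvCnt cells p.2 p.1 := by
    intro p hp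
    have hcond := List.of_mem_filter hp
    unfold pvCond at hcond
    simp only [Bool.and_eq_true, decide_eq_true_eq] at hcond
    exact pvBis_eq cells p.2 p.1 hcond.1.1 hcond.1.2
  rw [List.map_congr_left hmap]

-- B unfolded to the same sum
lemma pvB_eq (cells : List (Int × Int)) (grouping : List (List (Int × Int))) :
    compute_grouping_cost_alt cells grouping
      = (grouping.map (fun g =>
          (((PySem.Set.ofList g).filter (pvCond cells g)).map (fun p => pvCnt cells p.2 p.1)).sum)).sum := by
  have main : ∀ (L : List (List (Int × Int))) (total : Int),
      L.foldl (fun total g =>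
        (PySem.Set.ofList g).foldl (fun total p =>
          if (decide (0 ≤ p.1) && decide (p.1 < pvH cells) &&
              (p.1 == 0 || !((PySem.Set.ofList g).contains (p.1 - 1, p.2)))) then
            total + (PySem.List.bisectLeft ((pvColRows cells).getD p.2 []) p.1 : Int)
          else total) total) total
      = total + (L.map (fun g =>
          (((PySem.Set.ofList g).filter (pvCond cells g)).map (fun p => pvCnt cells p.2 p.1)).sum)).sum := by
    intro L
    induction L with
    | nil => intro total; simp
    | cons g T ih =>
      intro total
      rw [List.foldl_cons, pvB_group, ih]
      simp
      ring
  exact (main grouping 0).trans (zero_add _)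

-- ===== VERDICT (by name: the statement is the Claim_ definition above) =====
theorem compute_grouping_cost_spec : Claim_equal_compute_grouping_cost := by
  intro cells grouping _ _
  unfold Spec_compute_grouping_cost
  unfold compute_grouping_cost
  rw [pvB_eq]
  exact congrArg List.sum (List.map_congr_left (fun g _ => pvA_group_eq cells g))
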